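-- pv_equiv track=rewrite | github.com/borgnetzwerk/tools | import pytube.py | subtitle_clean
-- ===== SOURCE A (Python) =====
-- def subtitle_clean(subtitle_text):
--     subtitle_text = subtitle_text.split('\n\n')
--     sent_num = 1
--
--     result = ""
--     for i in range((len(subtitle_text)-1) // 2):
--         _, temp_time, temp_text = subtitle_text[i*2].split('\n')
--         temp_start = temp_time.strip().split(' --> ')[0]
--         _, next_time, _ = subtitle_text[(i+1)*2].split('\n')
--         temp_end = next_time.strip().split(' --> ')[0]
--         result += str(sent_num) + '\n'
--         result += temp_start + ' --> ' + temp_end + '\n'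
--         result += temp_text.strip() + '\n'
--         result += '\n'
--         sent_num += 1
--
--     rest = subtitle_text[-1].split('\n')
--     _ = rest[0]
--     temp_time = ""
--     if len(rest) > 1:
--         temp_time = rest[1]
--     temp_text = ""
--     if len(rest) > 2:
--         temp_text = rest[2]
--
--     result += str(sent_num) + '\n'
--     result += temp_time + '\n'
--     result += temp_text.strip() + '\n'
--     return result
-- ===== SOURCE B (Python) =====
-- def subtitle_clean(subtitle_text):
--     bs = subtitle_text.split('\n\n')
--     out = []
--     num = 1
--     # consume the block list from the front, two blocks per sentence; the last
--     # remaining block becomes the tail entry with the same running number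
--     while len(bs) >= 3:
--         _, time0, text0 = bs[0].split('\n')
--         _, time2, _ = bs[2].split('\n')
--         out += [str(num),
--                 time0.strip().split(' --> ')[0] + ' --> ' + time2.strip().split(' --> ')[0],
--                 text0.strip(),
--                 '']
--         bs = bs[2:]
--         num += 1
--     rest = bs[-1].split('\n')
--     out += [str(num),
--             rest[1] if len(rest) > 1 else '',
--             (rest[2] if len(rest) > 2 else '').strip(),
--             '']
--     return '\n'.join(out)
-- ===== Notes on version B (the rewrite author's own statement) =====
-- stated objective: alternative
-- what changed: B replaces A's counted index loop over range((len(blocks)-1)//2) with a while loop that consumes the block list itself from the front, two blocks per sentence (bs = bs[2:]), fuses the final-block entry into the loop exit using the same running number, and joins the collected lines once instead of growing a string by repeated concatenation.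
import Mathlib
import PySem

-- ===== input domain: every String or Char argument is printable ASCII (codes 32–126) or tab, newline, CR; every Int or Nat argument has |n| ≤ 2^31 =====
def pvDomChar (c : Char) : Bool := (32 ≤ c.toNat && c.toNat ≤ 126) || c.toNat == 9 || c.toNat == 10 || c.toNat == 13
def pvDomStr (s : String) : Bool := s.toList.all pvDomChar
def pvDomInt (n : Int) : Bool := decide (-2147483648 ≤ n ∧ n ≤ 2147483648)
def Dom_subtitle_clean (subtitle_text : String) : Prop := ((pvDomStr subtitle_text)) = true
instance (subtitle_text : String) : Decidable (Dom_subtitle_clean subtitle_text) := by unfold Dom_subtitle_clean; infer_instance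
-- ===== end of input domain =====

-- B consumes the block list from the front two blocks per step (the remaining list is the loop state),
-- fuses the tail entry into the loop exit, and joins the collected lines once — instead of A's counted
-- index loop over (len-1)//2 with string concatenation and a separate tail step.

-- shared primitive: Python s.split(sep) for a fixed nonempty sep (split? is always `some` then; exact)
def pySplit (s sep : String) : List String := (PySem.Str.split? s sep).getD [s]

-- ===== PORT A =====
-- A's loop body (the two 3-way unpacks; on a non-3-line block Python raises ValueError — excluded by Pre_)
def subtitleStepA (blocks : List String) (acc : String × Int) (i : Nat) : String × Int :=
  match pySplit (blocks.getD (i*2) "") "\n", pySplit (blocks.getD ((i+1)*2) "") "\n" with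
  | [_, temp_time, temp_text], [_, next_time, _] =>
      (acc.1 ++ PySem.Int.toStr acc.2 ++ "\n"
        ++ (pySplit (PySem.Str.strip temp_time) " --> ").headD "" ++ " --> "
        ++ (pySplit (PySem.Str.strip next_time) " --> ").headD "" ++ "\n"
        ++ PySem.Str.strip temp_text ++ "\n" ++ "\n",
       acc.2 + 1)
  | _, _ => acc

def subtitle_clean (subtitle_text : String) : String :=
  let blocks := pySplit subtitle_text "\n\n"
  let st := (List.range ((blocks.length - 1) / 2)).foldl (subtitleStepA blocks) ("", 1)
  let rest := pySplit (blocks.getLastD "") "\n"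
  let temp_time := if rest.length > 1 then rest.getD 1 "" else ""
  let temp_text := if rest.length > 2 then rest.getD 2 "" else ""
  st.1 ++ PySem.Int.toStr st.2 ++ "\n" ++ temp_time ++ "\n" ++ PySem.Str.strip temp_text ++ "\n"

-- ===== PORT B =====
-- B's while loop as the obvious structural recursion on its loop state (the remaining block list bs);
-- a non-3-line even block raises ValueError in Python (excluded by Pre_); the [] base case is
-- unreachable from B's Python (split never returns an empty list)
def subtitleEmitB : List String → Int → List String
  | b0 :: _b1 :: b2 :: rest, num =>
    (match pySplit b0 "\n", pySplit b2 "\n" with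
     | [_, time0, text0], [_, time2, _] =>
        [PySem.Int.toStr num,
         (pySplit (PySem.Str.strip time0) " --> ").headD "" ++ " --> "
           ++ (pySplit (PySem.Str.strip time2) " --> ").headD "",
         PySem.Str.strip text0, ""]
        ++ subtitleEmitB (b2 :: rest) (num + 1)
     | _, _ => [])
  | bs, num =>
    let rest := pySplit (bs.getLastD "") "\n"
    [PySem.Int.toStr num,
     if rest.length > 1 then rest.getD 1 "" else "",
     PySem.Str.strip (if rest.length > 2 then rest.getD 2 "" else ""), ""]
  termination_by bs _ => bs.length
  decreasing_by simp

def subtitle_clean_alt (subtitle_text : String) : String :=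
  PySem.Str.join "\n" (subtitleEmitB (pySplit subtitle_text "\n\n") 1)

-- ===== PRECONDITION & SPEC =====
-- Pre_ excludes exactly the inputs on which A raises ValueError: whenever the loop runs (m ≠ 0),
-- every even-indexed block it unpacks (indices 0, 2, …, 2m) must consist of exactly 3 lines.
def Pre_subtitle_clean (subtitle_text : String) : Prop :=
  ∀ k < ((pySplit subtitle_text "\n\n").length - 1) / 2 + 1,
    ((pySplit subtitle_text "\n\n").length - 1) / 2 ≠ 0 →
    (pySplit ((pySplit subtitle_text "\n\n").getD (2*k) "") "\n").length = 3
instance (subtitle_text : String) : Decidable (Pre_subtitle_clean subtitle_text) := by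
  unfold Pre_subtitle_clean; infer_instance
def pvWitness_subtitle_clean : String := "1\n00:01 --> 00:02\nhi\n\nx\n\n2\n00:02 --> 00:03\nthere"
def Spec_subtitle_clean (subtitle_text : String) (out : String) : Prop := out = subtitle_clean_alt subtitle_text
instance (subtitle_text : String) (out : String) : Decidable (Spec_subtitle_clean subtitle_text out) := by unfold Spec_subtitle_clean; infer_instance

-- ===== CLAIM (what is proved, stated in full; the proofs are below) =====
def Claim_equal_subtitle_clean : Prop := ∀ (subtitle_text : String), Dom_subtitle_clean subtitle_text → Pre_subtitle_clean subtitle_text → Spec_subtitle_clean subtitle_text (subtitle_clean subtitle_text)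

-- ===== LEMMAS AND PROOFS =====

-- the number of merged sentences A's loop produces
def pvHalf (bs : List String) : Nat := (bs.length - 1) / 2
-- the start timestamp and stripped text of even block 2*k
def pvStart (blocks : List String) (k : Nat) : String :=
  (pySplit (PySem.Str.strip ((pySplit (blocks.getD (2*k) "") "\n").getD 1 "")) " --> ").headD ""
def pvText (blocks : List String) (k : Nat) : String :=
  PySem.Str.strip ((pySplit (blocks.getD (2*k) "") "\n").getD 2 "")
-- the four output lines of sentence i, as one string (A's shape)
def pvChunk (blocks : List String) (i : Nat) : String :=
  PySem.Int.toStr ((i : Int) + 1) ++ "\n" ++ pvStart blocks i ++ " --> " ++ pvStart blocks (i+1)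
    ++ "\n" ++ pvText blocks i ++ "\n" ++ "\n"
-- the four lines of sentence i as B's list entries, numbering starting at num
def pvRow (blocks : List String) (num : Int) (i : Nat) : List String :=
  [PySem.Int.toStr (num + i), pvStart blocks i ++ " --> " ++ pvStart blocks (i+1), pvText blocks i, ""]
-- B's tail entry
def pvTail (blocks : List String) (num : Int) : List String :=
  [PySem.Int.toStr num,
   if (pySplit (blocks.getLastD "") "\n").length > 1 then (pySplit (blocks.getLastD "") "\n").getD 1 "" else "",
   PySem.Str.strip (if (pySplit (blocks.getLastD "") "\n").length > 2 then (pySplit (blocks.getLastD "") "\n").getD 2 "" else ""), ""]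
-- concatenation of a list of strings
def pvJoinS : List String → String
  | [] => ""
  | x :: t => x ++ pvJoinS t

theorem pvJoinS_concat (l : List String) (x : String) : pvJoinS (l ++ [x]) = pvJoinS l ++ x := by
  induction l with
  | nil => simp [pvJoinS]
  | cons a t ih => simp [pvJoinS, ih, String.append_assoc]

theorem eq_triple (l : List String) (h : l.length = 3) :
    l = [l.getD 0 "", l.getD 1 "", l.getD 2 ""] := by
  match l, h with
  | [a, b, c], _ => simp [List.getD]

theorem stepA_eq (blocks : List String) (acc : String × Int) (i : Nat)
    (h1 : (pySplit (blocks.getD (2*i) "") "\n").length = 3)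
    (h2 : (pySplit (blocks.getD (2*(i+1)) "") "\n").length = 3) :
    subtitleStepA blocks acc i =
      (acc.1 ++ PySem.Int.toStr acc.2 ++ "\n" ++ pvStart blocks i ++ " --> " ++ pvStart blocks (i+1)
        ++ "\n" ++ pvText blocks i ++ "\n" ++ "\n", acc.2 + 1) := by
  unfold subtitleStepA
  rw [show i*2 = 2*i from Nat.mul_comm i 2, show (i+1)*2 = 2*(i+1) from Nat.mul_comm (i+1) 2]
  rw [eq_triple _ h1, eq_triple _ h2]
  simp [pvStart, pvText]

theorem foldA (blocks : List String) (n : Nat)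
    (h3 : ∀ k, k ≤ n → (pySplit (blocks.getD (2*k) "") "\n").length = 3) :
    (List.range n).foldl (subtitleStepA blocks) ("", 1)
      = (pvJoinS ((List.range n).map (pvChunk blocks)), (n : Int) + 1) := by
  induction n with
  | zero => simp [pvJoinS]
  | succ n ih =>
    rw [List.range_succ]
    simp only [List.foldl_append, List.foldl_cons, List.foldl_nil, List.map_append,
      List.map_cons, List.map_nil, pvJoinS_concat]
    rw [ih (fun k hk => h3 k (by omega)), stepA_eq blocks _ n (h3 n (by omega)) (h3 (n+1) (by omega))]
    refine Prod.ext ?_ ?_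
    · simp [pvChunk, String.append_assoc]
    · push_cast; ring

-- shift of pvStart/pvText under dropping two leading blocks
theorem pvStart_shift (b0 b1 : String) (t : List String) (k : Nat) :
    pvStart (b0 :: b1 :: t) (k+1) = pvStart t k := by
  unfold pvStart
  rw [show 2*(k+1) = 2*k+1+1 by ring, List.getD_cons_succ, List.getD_cons_succ]
theorem pvText_shift (b0 b1 : String) (t : List String) (k : Nat) :
    pvText (b0 :: b1 :: t) (k+1) = pvText t k := by
  unfold pvText
  rw [show 2*(k+1) = 2*k+1+1 by ring, List.getD_cons_succ, List.getD_cons_succ]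

-- B's recursion, characterised: rows for each consecutive even pair, then the tail entry
theorem emitB_eq (bs : List String) (num : Int)
    (h3 : pvHalf bs ≠ 0 → ∀ k ≤ pvHalf bs, (pySplit (bs.getD (2*k) "") "\n").length = 3) :
    subtitleEmitB bs num
      = (List.range (pvHalf bs)).flatMap (pvRow bs num) ++ pvTail bs (num + (pvHalf bs : Int)) := by
  match bs with
  | [] => rw [subtitleEmitB.eq_def]; simp [pvTail, pvHalf]
  | [b0] => rw [subtitleEmitB.eq_def]; simp [pvTail, pvHalf]
  | [b0, b1] => rw [subtitleEmitB.eq_def]; simp [pvTail, pvHalf]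
  | b0 :: b1 :: b2 :: rest =>
    have hm : pvHalf (b0 :: b1 :: b2 :: rest) ≠ 0 := by
      unfold pvHalf; simp only [List.length_cons]; omega
    have hml : pvHalf (b0 :: b1 :: b2 :: rest) = pvHalf (b2 :: rest) + 1 := by
      unfold pvHalf; simp only [List.length_cons]; omega
    have hk0 : 0 ≤ pvHalf (b0 :: b1 :: b2 :: rest) := by omega
    have hk1 : 1 ≤ pvHalf (b0 :: b1 :: b2 :: rest) := by omega
    have h0 : (pySplit b0 "\n").length = 3 := by
      simpa [List.getD] using h3 hm 0 hk0
    have h2 : (pySplit b2 "\n").length = 3 := by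
      simpa [List.getD] using h3 hm 1 hk1
    have h3' : pvHalf (b2 :: rest) ≠ 0 →
        ∀ k ≤ pvHalf (b2 :: rest), (pySplit ((b2 :: rest).getD (2*k) "") "\n").length = 3 := by
      intro _ k hk
      have hk' : k + 1 ≤ pvHalf (b0 :: b1 :: b2 :: rest) := by omega
      have := h3 hm (k+1) hk'
      rwa [show 2*(k+1) = (2*k)+1+1 by ring, List.getD_cons_succ, List.getD_cons_succ] at this
    have ih := emitB_eq (b2 :: rest) (num + 1) h3'
    have hL : subtitleEmitB (b0 :: b1 :: b2 :: rest) num =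
        [PySem.Int.toStr num,
         (pySplit (PySem.Str.strip ((pySplit b0 "\n").getD 1 "")) " --> ").headD "" ++ " --> "
           ++ (pySplit (PySem.Str.strip ((pySplit b2 "\n").getD 1 "")) " --> ").headD "",
         PySem.Str.strip ((pySplit b0 "\n").getD 2 ""), ""]
        ++ subtitleEmitB (b2 :: rest) (num + 1) := by
      rw [subtitleEmitB.eq_1, eq_triple _ h0, eq_triple _ h2]
      simp [List.getD]
    have hrow0 : pvRow (b0 :: b1 :: b2 :: rest) num 0
        = [PySem.Int.toStr num,
           (pySplit (PySem.Str.strip ((pySplit b0 "\n").getD 1 "")) " --> ").headD "" ++ " --> "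
             ++ (pySplit (PySem.Str.strip ((pySplit b2 "\n").getD 1 "")) " --> ").headD "",
           PySem.Str.strip ((pySplit b0 "\n").getD 2 ""), ""] := by
      simp [pvRow, pvStart, pvText, List.getD]
    have hrowS : ∀ i : Nat, pvRow (b0 :: b1 :: b2 :: rest) num (i+1) = pvRow (b2 :: rest) (num+1) i := by
      intro i
      simp only [pvRow, pvStart_shift, pvText_shift]
      congr 2
      push_cast; ring
    have htail : pvTail (b0 :: b1 :: b2 :: rest) (num + (pvHalf (b0 :: b1 :: b2 :: rest) : Int))
        = pvTail (b2 :: rest) (num + 1 + (pvHalf (b2 :: rest) : Int)) := by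
      simp only [pvTail, List.getLastD_cons, hml]
      congr 2
      push_cast; ring
    rw [hL, ih, htail, hml, List.range_succ_eq_map, List.flatMap_cons, List.flatMap_map]
    rw [hrow0]
    simp only [hrowS, List.append_assoc]
  termination_by bs.length
  decreasing_by simp

theorem join_cons_ne (a : String) (rest : List String) (h : rest ≠ []) :
    PySem.Str.join "\n" (a :: rest) = a ++ "\n" ++ PySem.Str.join "\n" rest := by
  obtain ⟨b, t, rfl⟩ := List.exists_cons_of_ne_nil h
  simp only [PySem.Str.join, PySem.Chars.join, List.intercalate, List.map_cons,
    List.intersperse_cons₂, List.flatten_cons, String.ofList_append, String.append_assoc,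
    String.ofList_toList]

theorem join_single (a : String) : PySem.Str.join "\n" [a] = a := by
  simp [PySem.Str.join, PySem.Chars.join, List.intercalate]

theorem join_tail4 (a b c : String) :
    PySem.Str.join "\n" [a, b, c, ""] = a ++ "\n" ++ b ++ "\n" ++ c ++ "\n" := by
  rw [join_cons_ne _ _ (by simp), join_cons_ne _ _ (by simp), join_cons_ne _ _ (by simp), join_single]
  simp [String.append_assoc, String.append_empty]

theorem joinB (blocks : List String) (tail : List String) (h : tail ≠ []) (l : List Nat) :
    PySem.Str.join "\n" (l.flatMap (pvRow blocks 1) ++ tail)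
      = pvJoinS (l.map (pvChunk blocks)) ++ PySem.Str.join "\n" tail := by
  induction l with
  | nil => simp [pvJoinS, String.empty_append]
  | cons i l ih =>
    have hne : ∀ r : List String, r ++ tail ≠ [] := fun r hr => h (by
      rcases List.append_eq_nil_iff.mp hr with ⟨_, h2⟩; exact h2)
    simp only [List.flatMap_cons, pvRow, List.cons_append, List.map_cons, List.nil_append, pvJoinS]
    rw [join_cons_ne _ _ (by simp), join_cons_ne _ _ (by simp), join_cons_ne _ _ (by simp),
      join_cons_ne _ _ (hne _), ih]
    have : PySem.Int.toStr (1 + (i : Int)) = PySem.Int.toStr ((i : Int) + 1) := by rw [Int.add_comm]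
    simp only [this, pvChunk, String.append_assoc, String.empty_append]

-- ===== VERDICT (by name: the statement is the Claim_ definition above) =====
theorem subtitle_clean_spec : Claim_equal_subtitle_clean := by
  intro s _ hpre
  unfold Spec_subtitle_clean
  unfold Pre_subtitle_clean at hpre
  simp only [subtitle_clean, subtitle_clean_alt]
  revert hpre
  generalize pySplit s "\n\n" = blocks
  intro hpre
  have h3 : pvHalf blocks ≠ 0 →
      ∀ k ≤ pvHalf blocks, (pySplit (blocks.getD (2*k) "") "\n").length = 3 := by
    intro hm k hk
    exact hpre k (by unfold pvHalf at hk; omega) (by unfold pvHalf at hm; exact hm)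
  rw [emitB_eq blocks 1 h3]
  by_cases h0 : pvHalf blocks = 0
  · have h0' : (blocks.length - 1) / 2 = 0 := h0
    rw [h0', h0]
    simp only [List.range_zero, List.flatMap_nil, List.foldl_nil, List.nil_append, Nat.cast_zero,
      Int.add_zero]
    simp only [pvTail]
    rw [join_tail4]
    simp [String.empty_append]
  · have hA := foldA blocks (pvHalf blocks) (h3 h0)
    have hhalf : (blocks.length - 1) / 2 = pvHalf blocks := rfl
    rw [hhalf, hA, joinB blocks _ (by simp [pvTail]) (List.range _)]
    simp only [pvTail]
    rw [join_tail4]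
    have hcomm : PySem.Int.toStr (1 + ((pvHalf blocks : Nat) : Int)) =
        PySem.Int.toStr (((pvHalf blocks : Nat) : Int) + 1) := by rw [Int.add_comm]
    simp [hcomm, String.append_assoc]
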